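-- pv_equiv track=rewrite | github.com/DaeHee99/Algorithm | 프로그래머스/3/12938. 최고의 집합/최고의 집합.py | solution
-- ===== SOURCE A (Python) =====
-- def solution(n, s):
--     if n > s:
--         return [-1]
--
--     answer = []
--
--     while n > 0:
--         value = s // n
--         answer.append(value)
--         s -= value
--         n -= 1
--
--     return answer
-- ===== SOURCE B (Python) =====
-- def solution(n, s):
--     if n > s:
--         return [-1]
--     if n <= 0:
--         return []
--     q, r = divmod(s, n)
--     return [q] * (n - r) + [q + 1] * r
-- ===== Notes on version B (the rewrite author's own statement) =====
-- stated objective: simpler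
-- what changed: Replaces the accumulating while-loop of repeated floor divisions with a single closed-form construction [q]*(n-r)+[q+1]*r from one divmod.
import Mathlib
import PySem

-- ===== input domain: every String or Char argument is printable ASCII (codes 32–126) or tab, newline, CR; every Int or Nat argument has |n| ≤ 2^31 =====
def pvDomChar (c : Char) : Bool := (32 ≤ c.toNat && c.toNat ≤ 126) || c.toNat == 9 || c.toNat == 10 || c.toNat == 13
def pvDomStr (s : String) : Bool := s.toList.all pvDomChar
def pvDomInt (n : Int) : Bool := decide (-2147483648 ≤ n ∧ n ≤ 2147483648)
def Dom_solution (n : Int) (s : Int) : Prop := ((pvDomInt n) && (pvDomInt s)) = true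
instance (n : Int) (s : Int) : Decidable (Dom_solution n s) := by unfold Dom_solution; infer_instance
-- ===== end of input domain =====

-- B replaces A's accumulating while-loop of repeated floor divisions with a one-shot
-- closed-form construction [q]*(n-r)+[q+1]*r from a single divmod (simpler).


-- ===== PORT A =====
-- the while-loop: while n > 0: value = s // n; answer.append(value); s -= value; n -= 1
def solutionLoop (n : Int) (s : Int) (answer : List Int) : List Int :=
  if _h : n > 0 then
    let value := PySem.Int.floordiv s n
    solutionLoop (n - 1) (s - value) (answer ++ [value])
  else
    answer
termination_by n.toNat
decreasing_by omega

def solution (n : Int) (s : Int) : List Int :=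
  if n > s then [-1]
  else solutionLoop n s []

-- ===== PORT B =====
def solution_alt (n : Int) (s : Int) : List Int :=
  if n > s then [-1]
  else if n ≤ 0 then []
  else
    let q := PySem.Int.floordiv s n
    let r := PySem.Int.mod s n
    List.replicate (n - r).toNat q ++ List.replicate r.toNat (q + 1)

-- ===== PRECONDITION & SPEC =====
def Spec_solution (n : Int) (s : Int) (out : List Int) : Prop := out = solution_alt n s
instance (n : Int) (s : Int) (out : List Int) : Decidable (Spec_solution n s out) := by unfold Spec_solution; infer_instance

-- ===== CLAIM (what is proved, stated in full; the proofs are below) =====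
def Claim_equal_solution : Prop := ∀ (n : Int) (s : Int), Dom_solution n s → Spec_solution n s (solution n s)

-- ===== LEMMAS AND PROOFS =====

theorem solutionLoop_acc (n s : Int) (acc : List Int) :
    solutionLoop n s acc = acc ++ solutionLoop n s [] := by
  by_cases h : n > 0
  · conv_lhs => rw [solutionLoop]
    conv_rhs => rw [solutionLoop]
    simp only [h, dite_true]
    rw [solutionLoop_acc (n-1) (s - PySem.Int.floordiv s n) (acc ++ [PySem.Int.floordiv s n]),
        solutionLoop_acc (n-1) (s - PySem.Int.floordiv s n) ([] ++ [PySem.Int.floordiv s n])]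
    simp
  · conv_lhs => rw [solutionLoop]
    conv_rhs => rw [solutionLoop]
    simp [h]
termination_by n.toNat
decreasing_by all_goals omega

theorem solutionLoop_closed (n s : Int) (hn : 0 < n) :
    solutionLoop n s [] =
      List.replicate (n - PySem.Int.mod s n).toNat (PySem.Int.floordiv s n)
        ++ List.replicate (PySem.Int.mod s n).toNat (PySem.Int.floordiv s n + 1) := by
  have hb := PySem.Int.floordiv_mul_add_mod s n
  have hm0 : 0 ≤ PySem.Int.mod s n := PySem.Int.mod_nonneg s hn
  have hm1 : PySem.Int.mod s n < n := PySem.Int.mod_lt s hn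
  conv_lhs => rw [solutionLoop]
  simp only [hn, dite_true]
  rw [solutionLoop_acc]
  set q := PySem.Int.floordiv s n with hq
  set r := PySem.Int.mod s n with hr
  by_cases h1 : n = 1
  · -- one iteration left: n - 1 = 0, the recursive call stops immediately
    subst h1
    rw [solutionLoop]
    norm_num
    have hr0 : r = 0 := by omega
    simp [hr0]
  · have hn1 : 0 < n - 1 := by omega
    rw [solutionLoop_closed (n-1) (s - q) hn1]
    have hkey : s - q = q * (n - 1) + r := by linarith
    by_cases hrn : r = n - 1
    · have hq' : PySem.Int.floordiv (s - q) (n - 1) = q + 1 := by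
        rw [PySem.Int.floordiv_eq_iff_of_pos hn1]
        constructor <;> nlinarith
      have hm' : PySem.Int.mod (s - q) (n - 1) = 0 := by
        have h2 := PySem.Int.floordiv_mul_add_mod (s - q) (n - 1)
        rw [hq'] at h2; nlinarith
      rw [hq', hm', show ((n:Int) - 1 - 0) = r by omega]
      have h2 : (n - r).toNat = 1 := by omega
      simp [h2]
    · have hr' : r < n - 1 := by omega
      have hq' : PySem.Int.floordiv (s - q) (n - 1) = q := by
        rw [PySem.Int.floordiv_eq_iff_of_pos hn1]
        constructor <;> nlinarith
      have hm' : PySem.Int.mod (s - q) (n - 1) = r := by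
        have h2 := PySem.Int.floordiv_mul_add_mod (s - q) (n - 1)
        rw [hq'] at h2; nlinarith
      rw [hq', hm']
      have h2 : (n - r).toNat = (n - 1 - r).toNat + 1 := by omega
      rw [h2]
      simp [List.replicate_succ]
termination_by n.toNat
decreasing_by all_goals omega

-- ===== VERDICT (by name: the statement is the Claim_ definition above) =====
theorem solution_spec : Claim_equal_solution := by
  intro n s _
  unfold Spec_solution solution solution_alt
  by_cases hgt : n > s
  · simp [hgt]
  · simp only [hgt, if_false]
    by_cases hn : n ≤ 0
    · rw [solutionLoop]
      simp [hn, show ¬ n > 0 by omega]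
    · simp only [hn, if_false]
      exact solutionLoop_closed n s (by omega)
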